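-- pv_equiv track=rewrite | github.com/benbrunyee/fulcrum-export-import | update_records_custom/update_records_custom.py | get_single_matching_record
-- ===== SOURCE A (Python) =====
-- def get_single_matching_record(id: str, current_records: list):
--     matching_records = [r for r in current_records if r["id"] == id]
--     if len(matching_records) == 0:
--         raise Exception(f"Could not find matching record in the new app: {id}")
--     elif len(matching_records) > 1:
--         raise Exception(f"More than one matching record found: {id}.")
--     else:
--         return matching_records[0]
-- ===== SOURCE B (Python) =====
-- def get_single_matching_record(id: str, current_records: list):
--     # One pass with early exit: keep the first match and a count instead of
--     # building an intermediate list.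
--     count = 0
--     first = None
--     for r in current_records:
--         if r["id"] == id:
--             if count == 1:
--                 raise Exception(f"More than one matching record found: {id}.")
--             count = 1
--             first = r
--     if count == 0:
--         raise Exception(f"Could not find matching record in the new app: {id}")
--     return first
-- ===== Notes on version B (the rewrite author's own statement) =====
-- stated objective: alternative
-- what changed: Replaces the collect-then-count list comprehension with a single stateful pass that keeps only a match count and the first match, raising on the second match immediately (early exit) instead of materialising the list of all matches.
import Mathlib
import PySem

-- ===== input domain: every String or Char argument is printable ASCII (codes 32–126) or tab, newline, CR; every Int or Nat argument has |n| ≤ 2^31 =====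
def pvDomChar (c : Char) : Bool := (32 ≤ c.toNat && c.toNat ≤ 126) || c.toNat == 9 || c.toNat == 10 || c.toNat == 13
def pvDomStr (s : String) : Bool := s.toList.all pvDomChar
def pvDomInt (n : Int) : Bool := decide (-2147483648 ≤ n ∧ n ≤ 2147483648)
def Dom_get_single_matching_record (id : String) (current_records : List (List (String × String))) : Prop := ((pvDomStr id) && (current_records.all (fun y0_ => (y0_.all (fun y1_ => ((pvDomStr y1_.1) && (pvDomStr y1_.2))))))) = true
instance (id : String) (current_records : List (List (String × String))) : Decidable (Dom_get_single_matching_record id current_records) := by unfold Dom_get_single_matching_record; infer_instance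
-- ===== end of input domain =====

-- B replaces the collect-then-count comprehension by one stateful pass (count + first match, early exit on a second match); same cost, no intermediate list.
-- Python dict lookup r["id"] on an association list: first matching key (exact for dicts ported as assoc lists).
def pvIdOf (r : List (String × String)) : Option String :=
  (r.find? (fun p => p.1 == "id")).map (·.2)

-- ===== PORT A =====
def get_single_matching_record (id : String) (current_records : List (List (String × String))) : List (String × String) :=
  let matching_records := current_records.filter (fun r => pvIdOf r == some id)
  if matching_records.length = 0 then []            -- Python raises "Could not find matching record …" (excluded by Pre_)
  else if 1 < matching_records.length then []       -- Python raises "More than one matching record found …" (excluded by Pre_)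
  else matching_records.headD []

-- ===== PORT B =====
def pvAltGo (id : String) : List (List (String × String)) → Option (List (String × String)) → List (String × String)
  | [], acc =>
      match acc with
      | some f => f
      | none => []                                  -- count = 0: Python raises (excluded by Pre_)
  | r :: rest, acc =>
      if pvIdOf r == some id then
        match acc with
        | some f => f                               -- second match: Python raises here (excluded by Pre_)
        | none => pvAltGo id rest (some r)
      else pvAltGo id rest acc

def get_single_matching_record_alt (id : String) (current_records : List (List (String × String))) : List (String × String) :=
  pvAltGo id current_records none

-- ===== PRECONDITION & SPEC =====
-- Pre_ excludes exactly the inputs on which A raises: a record without an "id" key (KeyError),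
-- or a number of matching records different from one (the two explicit raises).
def Pre_get_single_matching_record (id : String) (current_records : List (List (String × String))) : Prop :=
  (∀ r ∈ current_records, (pvIdOf r).isSome) ∧
  current_records.countP (fun r => pvIdOf r == some id) = 1
instance (id : String) (current_records : List (List (String × String))) : Decidable (Pre_get_single_matching_record id current_records) := by unfold Pre_get_single_matching_record; infer_instance

def pvWitness_get_single_matching_record : String × (List (List (String × String))) :=
  ("a", [[("id", "a"), ("x", "1")], [("id", "b")]])

def Spec_get_single_matching_record (id : String) (current_records : List (List (String × String))) (out : List (String × String)) : Prop := out = get_single_matching_record_alt id current_records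
instance (id : String) (current_records : List (List (String × String))) (out : List (String × String)) : Decidable (Spec_get_single_matching_record id current_records out) := by unfold Spec_get_single_matching_record; infer_instance

-- ===== CLAIM (what is proved, stated in full; the proofs are below) =====
def Claim_equal_get_single_matching_record : Prop := ∀ (id : String) (current_records : List (List (String × String))), Dom_get_single_matching_record id current_records → Pre_get_single_matching_record id current_records → Spec_get_single_matching_record id current_records (get_single_matching_record id current_records)

-- ===== LEMMAS AND PROOFS =====
theorem pvAltGo_of_countP_zero (id : String) (l : List (List (String × String))) (f : List (String × String))
    (h : l.countP (fun r => pvIdOf r == some id) = 0) : pvAltGo id l (some f) = f := by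
  induction l with
  | nil => rfl
  | cons r rest ih =>
      rw [List.countP_cons] at h
      by_cases hp : (pvIdOf r == some id) = true
      · simp [hp] at h
      · simp only [pvAltGo, hp, Bool.false_eq_true, if_false]
        exact ih (by omega)

theorem pvAltGo_eq_filter_head (id : String) (l : List (List (String × String)))
    (h : l.countP (fun r => pvIdOf r == some id) = 1) :
    pvAltGo id l none = (l.filter (fun r => pvIdOf r == some id)).headD [] := by
  induction l with
  | nil => simp at h
  | cons r rest ih =>
      rw [List.countP_cons] at h
      by_cases hp : (pvIdOf r == some id) = true
      · have h0 : rest.countP (fun r => pvIdOf r == some id) = 0 := by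
          simp only [hp, if_true] at h; omega
        rw [List.filter_cons]
        simp only [pvAltGo, hp, if_true, List.headD_cons]
        exact pvAltGo_of_countP_zero id rest r h0
      · rw [List.filter_cons]
        simp only [pvAltGo, hp, Bool.false_eq_true, if_false]
        exact ih (by simpa [hp] using h)

-- ===== VERDICT (by name: the statement is the Claim_ definition above) =====
theorem get_single_matching_record_spec : Claim_equal_get_single_matching_record := by
  intro id crs _ hpre
  obtain ⟨-, hcnt⟩ := hpre
  unfold Spec_get_single_matching_record get_single_matching_record get_single_matching_record_alt
  have hlen : (crs.filter (fun r => pvIdOf r == some id)).length = 1 := by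
    rw [← List.countP_eq_length_filter]; exact hcnt
  rw [pvAltGo_eq_filter_head id crs hcnt]
  simp [hlen]
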